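-- pv_equiv track=rewrite | github.com/iknoom/Problem_Solving | Codeforces/Round 779 div2/D2.py | sub_solution_d1
-- ===== SOURCE A (Python) =====
-- def sub_solution_d1(l, r, a):
--     b = {i for i in range(l, r + 1)}
--     bits1 = [0] * 18
--     bits2 = [0] * 18
--     for c in a:
--         for i in range(18):
--             if c & (1 << i):
--                 bits1[i] += 1
--     for c in b:
--         for i in range(18):
--             if c & (1 << i):
--                 bits2[i] += 1
--     ans = 0
--     for i in range(18):
--         if bits1[i] != bits2[i]:
--             ans += (1 << i)
--     return ans
-- ===== SOURCE B (Python) =====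
-- def sub_solution_d1(l, r, a):
--     # Closed-form per-bit counting: f(n) is a prefix function whose difference
--     # f(hi) - f(l) counts integers in [l, r] with bit i set, so no loop over the range.
--     hi = max(l, r + 1)  # empty range when r < l
--     ans = 0
--     for i in range(18):
--         m = 1 << i
--         def f(n):
--             return (n // (2 * m)) * m + max(0, n % (2 * m) - m)
--         range_cnt = f(hi) - f(l)
--         arr_cnt = sum(1 for c in a if (c // m) % 2 == 1)
--         if arr_cnt != range_cnt:
--             ans += m
--     return ans
-- ===== Notes on version B (the rewrite author's own statement) =====
-- stated objective: alternative
-- what changed: A materialises the whole range [l, r] as a set and counts each of its elements' bits in a loop; B instead computes the per-bit count of the range with a closed-form prefix formula f(n) = (n//(2m))*m + max(0, n%(2m) - m), so the range is never iterated.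
import Mathlib
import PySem

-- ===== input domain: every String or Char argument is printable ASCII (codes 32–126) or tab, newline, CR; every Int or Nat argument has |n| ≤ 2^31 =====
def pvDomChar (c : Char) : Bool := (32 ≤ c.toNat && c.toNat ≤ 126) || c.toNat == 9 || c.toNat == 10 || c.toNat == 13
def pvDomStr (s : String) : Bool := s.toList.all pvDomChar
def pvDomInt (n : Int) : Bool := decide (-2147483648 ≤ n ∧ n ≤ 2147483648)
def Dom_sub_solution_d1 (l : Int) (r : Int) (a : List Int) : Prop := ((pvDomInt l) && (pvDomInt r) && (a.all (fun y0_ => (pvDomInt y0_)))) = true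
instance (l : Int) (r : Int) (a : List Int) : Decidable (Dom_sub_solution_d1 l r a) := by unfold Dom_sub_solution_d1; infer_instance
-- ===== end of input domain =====

-- B replaces A's loop over every element of the range [l, r] by a closed-form
-- per-bit prefix count (objective: alternative algorithm for the range side).

-- ===== PORT A =====
-- Python's set comprehension '{i for i in range(l, r + 1)}': first-occurrence dedup.
-- Extensionally EQUAL to PySem.Set.ofList (theorem pvSetOfList_eq_ofList below) — the
-- only difference is an O(1) HashSet membership index standing in for Python's hash
-- table, where PySem.Set.ofList's list scan would be quadratic in the range width.
def pvSetFold (xs : List Int) (racc : List Int) (seen : Std.HashSet Int) : List Int :=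
  match xs with
  | [] => racc.reverse
  | x :: rest =>
      if seen.contains x then pvSetFold rest racc seen
      else pvSetFold rest (x :: racc) (seen.insert x)

def pvSetOfList (xs : List Int) : PySem.Set Int := pvSetFold xs [] ∅

-- the body of A's inner loop 'for i in range(18): if c & (1 << i): bits[i] += 1'
def pvBitsInner (c : Int) (bits : List Int) (i : Nat) : List Int :=
  if PySem.Int.band c ((1:Int) <<< i) ≠ 0 then
    PySem.List.pySetD bits (i : Int) (PySem.List.pyGetD bits (i : Int) 0 + 1)
  else bits

-- the shared body of A's two identical per-element loops
def pvBitsStep (c : Int) (bits : List Int) : List Int :=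
  (List.range 18).foldl (pvBitsInner c) bits

def sub_solution_d1 (l : Int) (r : Int) (a : List Int) : Int :=
  let b := pvSetOfList (PySem.List.pyRange l (r + 1) 1)
  let bits1 := a.foldl (fun bits c => pvBitsStep c bits) (List.replicate 18 (0:Int))
  let bits2 := b.foldl (fun bits c => pvBitsStep c bits) (List.replicate 18 (0:Int))
  (List.range 18).foldl (fun ans (i : Nat) =>
    if PySem.List.pyGetD bits1 (i : Int) 0 ≠ PySem.List.pyGetD bits2 (i : Int) 0 then
      ans + ((1:Int) <<< i)
    else ans) 0

-- ===== PORT B =====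
def pvF (m : Int) (n : Int) : Int :=
  PySem.Int.floordiv n (2 * m) * m + max 0 (PySem.Int.mod n (2 * m) - m)

def sub_solution_d1_alt (l : Int) (r : Int) (a : List Int) : Int :=
  let hi := max l (r + 1)
  (List.range 18).foldl (fun ans (i : Nat) =>
    let m : Int := (1:Int) <<< i
    let range_cnt := pvF m hi - pvF m l
    let arr_cnt := a.foldl (fun s c =>
      if PySem.Int.mod (PySem.Int.floordiv c m) 2 = 1 then s + 1 else s) (0:Int)
    if arr_cnt ≠ range_cnt then ans + m else ans) 0

-- ===== PRECONDITION & SPEC =====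
def Spec_sub_solution_d1 (l : Int) (r : Int) (a : List Int) (out : Int) : Prop := out = sub_solution_d1_alt l r a
instance (l : Int) (r : Int) (a : List Int) (out : Int) : Decidable (Spec_sub_solution_d1 l r a out) := by unfold Spec_sub_solution_d1; infer_instance

-- ===== CLAIM (what is proved, stated in full; the proofs are below) =====
def Claim_equal_sub_solution_d1 : Prop := ∀ (l : Int) (r : Int) (a : List Int), Dom_sub_solution_d1 l r a → Spec_sub_solution_d1 l r a (sub_solution_d1 l r a)

-- ===== LEMMAS AND PROOFS =====

-- the HashSet-indexed dedup is exactly PySem.Set.ofList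
theorem pvSetFold_eq_foldl (xs : List Int) : ∀ (racc : List Int) (seen : Std.HashSet Int),
    (∀ x : Int, seen.contains x = racc.contains x) →
    pvSetFold xs racc seen = xs.foldl PySem.Set.add racc.reverse := by
  induction xs with
  | nil => intro racc seen _; rfl
  | cons x rest ih =>
      intro racc seen hinv
      rw [List.foldl_cons]
      unfold pvSetFold
      have hrc : ∀ y : Int, racc.reverse.contains y = racc.contains y := by
        intro y; simp [List.contains_eq_mem]
      have hadd : PySem.Set.add racc.reverse x =
          if racc.reverse.contains x then racc.reverse else racc.reverse ++ [x] := rfl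
      by_cases h : racc.contains x = true
      · rw [if_pos (by rw [hinv]; exact h), hadd, if_pos (by rw [hrc]; exact h)]
        exact ih racc seen hinv
      · rw [if_neg (by rw [hinv]; exact h), hadd, if_neg (by rw [hrc]; exact h)]
        rw [ih (x :: racc) (seen.insert x) ?_, List.reverse_cons]
        intro y
        rw [Std.HashSet.contains_insert, hinv y]
        by_cases hxy : x = y
        · subst hxy; simp [List.contains_eq_mem]
        · simp [List.contains_eq_mem, hxy, Ne.symm hxy]

theorem pvSetOfList_eq_ofList (xs : List Int) : pvSetOfList xs = PySem.Set.ofList xs := by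
  unfold pvSetOfList PySem.Set.ofList
  exact pvSetFold_eq_foldl xs [] ∅ (fun x => by simp)

-- the bit-i predicate that A's truthiness test computes
def pvBit (i : Nat) (c : Int) : Bool := decide (PySem.Int.band c ((1:Int) <<< i) ≠ 0)

theorem pv_one_shiftLeft (i : Nat) : ((1:Int) <<< i) = 2 ^ i := by
  simp [Int.shiftLeft_eq]

-- Python's truthiness test 'c & (1 << i)' equals the arithmetic bit test '(c // 2**i) % 2 == 1'
theorem pv_bit_mod (c : Int) (i : Nat) :
    (PySem.Int.band c ((1:Int) <<< i) ≠ 0) ↔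
      (PySem.Int.mod (PySem.Int.floordiv c ((1:Int) <<< i)) 2 = 1) := by
  rw [pv_one_shiftLeft]
  have hp : (0:Int) < 2 ^ i := by positivity
  have hpn : 0 < 2 ^ i := by positivity
  have hcast : ((2:Int) ^ i) = ((2 ^ i : Nat) : Int) := by push_cast; ring
  rw [PySem.Int.mod_eq_emod_of_pos (by norm_num), PySem.Int.floordiv_eq_ediv_of_pos hp]
  by_cases hc : 0 ≤ c
  · obtain ⟨N, rfl⟩ : ∃ N : Nat, c = (N : Int) := ⟨c.toNat, (Int.toNat_of_nonneg hc).symm⟩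
    rw [hcast, PySem.Int.band_natCast, Nat.and_two_pow, Nat.toNat_testBit]
    have hRHS : ((N:Int) / ((2 ^ i : Nat) : Int)) % 2 = ((N / 2 ^ i % 2 : Nat) : Int) := by
      rw [← Int.natCast_div]
      exact_mod_cast (Int.natCast_emod (N / 2 ^ i) 2).symm
    rw [hRHS]
    have hx01 : N / 2 ^ i % 2 = 0 ∨ N / 2 ^ i % 2 = 1 := by omega
    rcases hx01 with h | h
    · rw [h]; simp
    · rw [h]; simp
  · rw [not_le] at hc
    set M : Nat := (-c - 1).toNat with hM
    have hcM : c = -(M : Int) - 1 := by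
      have : ((-c - 1).toNat : Int) = -c - 1 := Int.toNat_of_nonneg (by omega)
      omega
    have htn : ((2:Int) ^ i).toNat = 2 ^ i := by
      rw [hcast]; exact Int.toNat_natCast _
    have hband : PySem.Int.band c ((2:Int) ^ i) =
        ((2 ^ i - (2 ^ i &&& M) : Nat) : Int) := by
      show (if 0 ≤ c then _ else _) = _
      rw [if_neg (by omega), if_pos (le_of_lt hp), htn, hM]
    rw [hband, Nat.two_pow_and, Nat.toNat_testBit]
    have hdiv : c / ((2:Int) ^ i) = -((M / 2 ^ i : Nat) : Int) - 1 := by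
      rw [hcM]
      have h1 : (-(M:Int) - 1) = -((M:Int) + 1) := by ring
      rw [h1, Int.neg_ediv, hcast]
      have h2 : ((M:Int) + 1) = ((M + 1 : Nat) : Int) := by push_cast; ring
      rw [h2, ← Int.natCast_div]
      by_cases hd : (2 ^ i : Nat) ∣ (M + 1)
      · rw [if_pos (by exact_mod_cast hd)]
        have h3 : (M + 1) / 2 ^ i = M / 2 ^ i + 1 := by rw [Nat.succ_div, if_pos hd]
        rw [h3]; push_cast; ring
      · rw [if_neg (by exact_mod_cast hd)]
        have h3 : (M + 1) / 2 ^ i = M / 2 ^ i := by simp [Nat.succ_div, hd]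
        have hsign : (((2 ^ i : Nat) : Int)).sign = 1 :=
          Int.sign_eq_one_of_pos (by exact_mod_cast hpn)
        rw [h3, hsign]
    rw [hdiv]
    by_cases h : M / 2 ^ i % 2 = 0
    · have hyc : ((M / 2 ^ i : Nat) : Int) % 2 = 0 := by
        have h0 := Int.natCast_emod (M / 2 ^ i) 2
        rw [h] at h0; simpa using h0.symm
      rw [h]
      simp only [Nat.mul_zero, Nat.sub_zero]
      have hposI : (0:Int) < ((2 ^ i : Nat) : Int) := by exact_mod_cast hpn
      exact iff_of_true hposI.ne' (by omega)
    · have h1 : M / 2 ^ i % 2 = 1 := by omega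
      have hyc : ((M / 2 ^ i : Nat) : Int) % 2 = 1 := by
        have h0 := Int.natCast_emod (M / 2 ^ i) 2
        rw [h1] at h0; simpa using h0.symm
      rw [h1]
      simp only [Nat.mul_one, Nat.sub_self, Nat.cast_zero]
      exact iff_of_false (by simp) (by omega)

-- a counting foldl is a countP
theorem pv_foldl_count (p : Int → Prop) [DecidablePred p] (xs : List Int) (s0 : Int) :
    xs.foldl (fun s c => if p c then s + 1 else s) s0 =
      s0 + (xs.countP (fun c => decide (p c)) : Int) := by
  induction xs generalizing s0 with
  | nil => simp
  | cons x xs ih =>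
      simp only [List.foldl_cons, List.countP_cons, ih]
      by_cases h : p x
      · simp [h]; ring
      · simp [h]

-- one pvBitsInner step preserves the length
theorem pv_inner_len (c : Int) (b : List Int) (i : Nat) :
    (pvBitsInner c b i).length = b.length := by
  unfold pvBitsInner
  split
  · exact PySem.List.length_pySetD b (i : Int) _
  · rfl

-- the inner range-n fold preserves the length
theorem pv_aux_len (c : Int) (n : Nat) (bits : List Int) :
    ((List.range n).foldl (pvBitsInner c) bits).length = bits.length := by
  induction n with
  | zero => rfl
  | succ n ih =>
      rw [List.range_succ, List.foldl_append, List.foldl_cons, List.foldl_nil,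
          pv_inner_len, ih]

-- effect of the inner range-n fold on one slot
theorem pv_aux_get (c : Int) (n : Nat) (bits : List Int) (j : Nat) (hj : j < bits.length)
    (hn : n ≤ bits.length) :
    (((List.range n).foldl (pvBitsInner c) bits)[j]?).getD 0 =
      (bits[j]?).getD 0 + (if j < n ∧ pvBit j c = true then 1 else 0) := by
  induction n with
  | zero => simp
  | succ n ih =>
      have ihg := ih (by omega)
      rw [List.range_succ, List.foldl_append, List.foldl_cons, List.foldl_nil]
      set B := (List.range n).foldl (pvBitsInner c) bits with hB
      have hBlen : B.length = bits.length := pv_aux_len c n bits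
      unfold pvBitsInner
      by_cases hb : PySem.Int.band c ((1:Int) <<< n) ≠ 0
      · rw [if_pos hb]
        rw [PySem.List.pySetD_natCast, PySem.List.pyGetD_natCast, List.getD_eq_getElem?_getD]
        rw [List.getElem?_set]
        by_cases hjn : n = j
        · subst hjn
          rw [if_pos rfl, if_pos (by omega)]
          simp only [Option.getD_some]
          rw [ihg]
          have hbit : pvBit n c = true := by simp [pvBit, hb]
          simp [hbit]
        · rw [if_neg hjn, ihg]
          have hcnd : (j < n ∧ pvBit j c = true) ↔ (j < n + 1 ∧ pvBit j c = true) := by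
            constructor
            · rintro ⟨h1, h2⟩; exact ⟨by omega, h2⟩
            · rintro ⟨h1, h2⟩
              refine ⟨?_, h2⟩
              rcases (by omega : j < n ∨ j = n) with h3 | h3
              · exact h3
              · exact absurd h3.symm hjn
          rw [if_congr hcnd rfl rfl]
      · rw [if_neg hb, ihg]
        have hb0 : PySem.Int.band c ((1:Int) <<< n) = 0 := not_ne_iff.mp hb
        have hbit : pvBit n c = false := by simp [pvBit, hb0]
        have hcnd : (j < n ∧ pvBit j c = true) ↔ (j < n + 1 ∧ pvBit j c = true) := by
          constructor
          · rintro ⟨h1, h2⟩; exact ⟨by omega, h2⟩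
          · rintro ⟨h1, h2⟩
            refine ⟨?_, h2⟩
            rcases (by omega : j < n ∨ j = n) with h3 | h3
            · exact h3
            · subst h3; rw [hbit] at h2; simp at h2
        rw [if_congr hcnd rfl rfl]

-- the whole bits-array fold computes per-bit counts
theorem pv_bits_outer (xs : List Int) : ∀ (bits : List Int), bits.length = 18 →
    (xs.foldl (fun bits c => pvBitsStep c bits) bits).length = 18 ∧
    ∀ j : Nat, j < 18 →
      ((xs.foldl (fun bits c => pvBitsStep c bits) bits)[j]?).getD 0 =
        (bits[j]?).getD 0 + (xs.countP (pvBit j) : Int) := by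
  induction xs with
  | nil => intro bits hlen; simp [hlen]
  | cons x xs ih =>
      intro bits hlen
      have hstepLen : (pvBitsStep x bits).length = 18 := by
        unfold pvBitsStep; rw [pv_aux_len, hlen]
      obtain ⟨ihl, ihg⟩ := ih (pvBitsStep x bits) hstepLen
      constructor
      · simpa using ihl
      · intro j hj
        simp only [List.foldl_cons]
        rw [ihg j hj]
        have hget := pv_aux_get x 18 bits j (by omega) (by omega)
        unfold pvBitsStep
        rw [hget, List.countP_cons]
        by_cases hb : pvBit j x = true
        · simp [hb, hj]; ring
        · simp [hb]

-- the bits array of A holds per-bit counts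
theorem pv_bits_fold_get (xs : List Int) (j : Nat) (hj : j < 18) :
    PySem.List.pyGetD (xs.foldl (fun bits c => pvBitsStep c bits) (List.replicate 18 (0:Int))) (j : Int) 0 =
      (xs.countP (pvBit j) : Int) := by
  obtain ⟨_, hg⟩ := pv_bits_outer xs (List.replicate 18 (0:Int)) (by simp)
  rw [PySem.List.pyGetD_natCast, List.getD_eq_getElem?_getD, hg j hj,
      List.getElem?_replicate]
  simp [hj]

-- set(xs) of a duplicate-free list is the list itself
theorem pv_add_aux : ∀ (xs s : List Int), (s ++ xs).Nodup → xs.foldl PySem.Set.add s = s ++ xs := by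
  intro xs
  induction xs with
  | nil => intro s _; simp
  | cons x xs ih =>
      intro s h
      have hx : x ∉ s := by
        rw [List.nodup_append] at h
        intro hmem
        exact h.2.2 x hmem x (by simp) rfl
      have hadd : PySem.Set.add s x = s ++ [x] := by
        unfold PySem.Set.add
        rw [if_neg (by simpa using hx)]
      rw [List.foldl_cons, hadd, ih (s ++ [x]) (by simpa using h)]
      simp

theorem pv_ofList_nodup {xs : List Int} (h : xs.Nodup) : PySem.Set.ofList xs = xs := by
  have := pv_add_aux xs [] (by simpa using h)
  simpa [PySem.Set.ofList, PySem.Set.empty] using this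

-- the closed-form prefix function steps by exactly the bit indicator
theorem pv_F_step (m n : Int) (hm : 0 < m) :
    pvF m (n + 1) = pvF m n + (if PySem.Int.mod (PySem.Int.floordiv n m) 2 = 1 then 1 else 0) := by
  have h2m : (0:Int) < 2 * m := by omega
  unfold pvF
  rw [PySem.Int.floordiv_eq_ediv_of_pos h2m, PySem.Int.floordiv_eq_ediv_of_pos h2m,
      PySem.Int.floordiv_eq_ediv_of_pos hm,
      PySem.Int.mod_eq_emod_of_pos h2m, PySem.Int.mod_eq_emod_of_pos h2m,
      PySem.Int.mod_eq_emod_of_pos (by norm_num : (0:Int) < 2)]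
  set q := n / (2*m) with hq
  set s := n % (2*m) with hs
  have hn : 2*m*q + s = n := Int.mul_ediv_add_emod n (2*m)
  have hs0 : 0 ≤ s := Int.emod_nonneg n (by omega)
  have hs2 : s < 2*m := Int.emod_lt_of_pos n h2m
  have hn' : n = s + (2*q) * m := by rw [← hn]; ring
  have hb : n / m = 2*q + (if m ≤ s then 1 else 0) := by
    rw [hn', Int.add_mul_ediv_right s (2*q) (ne_of_gt hm)]
    by_cases hsm : m ≤ s
    · have h1 : 1 ≤ s / m := (Int.le_ediv_iff_mul_le hm).mpr (by linarith)
      have h2 : s / m < 2 := (Int.ediv_lt_iff_lt_mul hm).mpr (by linarith)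
      rw [if_pos hsm]; omega
    · have h1 : s / m = 0 := Int.ediv_eq_zero_of_lt hs0 (by omega)
      rw [if_neg hsm, h1]; ring
  by_cases hse : s = 2*m - 1
  · have huniq : (n+1) / (2*m) = q + 1 ∧ (n+1) % (2*m) = 0 :=
      (Int.ediv_emod_unique h2m).mpr ⟨by rw [hn', hse]; ring, le_refl 0, h2m⟩
    rw [huniq.1, huniq.2, hb]
    have hsm : m ≤ s := by omega
    rw [if_pos hsm]
    have hmod : (2*q + 1) % 2 = 1 := by omega
    rw [hmod, if_pos rfl]
    rw [max_eq_left (by omega), max_eq_right (by omega)]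
    rw [hse]; ring
  · have huniq : (n+1) / (2*m) = q ∧ (n+1) % (2*m) = s + 1 :=
      (Int.ediv_emod_unique h2m).mpr ⟨by rw [hn']; ring, by omega, by omega⟩
    rw [huniq.1, huniq.2, hb]
    by_cases hsm : m ≤ s
    · rw [if_pos hsm]
      have hmod : (2*q + 1) % 2 = 1 := by omega
      rw [hmod, if_pos rfl]
      rw [max_eq_right (by omega), max_eq_right (by omega)]
      ring
    · rw [if_neg hsm]
      have hmod : (2*q + 0) % 2 = 0 := by omega
      rw [hmod, if_neg (by norm_num)]
      rw [max_eq_left (by omega), max_eq_left (by omega)]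
      ring

-- count of set bits over a contiguous range is the difference of prefix values
theorem pv_range_count (m : Int) (hm : 0 < m) (l u : Int) (hlu : l ≤ u) :
    ((PySem.List.pyRange l u 1).countP
        (fun c => decide (PySem.Int.mod (PySem.Int.floordiv c m) 2 = 1)) : Int) =
      pvF m u - pvF m l := by
  obtain ⟨k, hk⟩ : ∃ k : Nat, u = l + k := ⟨(u - l).toNat, by omega⟩
  subst hk
  clear hlu
  induction k generalizing l with
  | zero =>
      rw [PySem.List.pyRange_one_eq_nil (by simp)]
      simp
  | succ k ih =>
      rw [PySem.List.pyRange_one_cons (by push_cast; omega)]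
      rw [List.countP_cons]
      have hrw : l + ((k+1 : Nat) : Int) = (l + 1) + (k : Int) := by push_cast; ring
      rw [hrw]
      have ihl := ih (l + 1)
      have hstep := pv_F_step m l hm
      by_cases h : PySem.Int.mod (PySem.Int.floordiv l m) 2 = 1
      · rw [if_pos h] at hstep
        simp only [h, decide_true, if_pos]
        push_cast
        omega
      · rw [if_neg h] at hstep
        simp only [h, decide_false]
        push_cast
        omega

-- ===== VERDICT (by name: the statement is the Claim_ definition above) =====
theorem sub_solution_d1_spec : Claim_equal_sub_solution_d1 := by
  intro l r a _
  unfold Spec_sub_solution_d1 sub_solution_d1 sub_solution_d1_alt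
  dsimp only
  apply PySem.List.foldl_congr_mem
  intro acc i hi
  have hi18 : i < 18 := List.mem_range.mp hi
  have hm : (0:Int) < ((1:Int) <<< i) := by rw [pv_one_shiftLeft]; positivity
  have h1 : PySem.List.pyGetD
      (a.foldl (fun bits c => pvBitsStep c bits) (List.replicate 18 (0:Int))) (i : Int) 0 =
      (a.countP (pvBit i) : Int) := pv_bits_fold_get a i hi18
  have hcnt : ∀ xs : List Int,
      List.countP (fun c => decide (PySem.Int.mod (PySem.Int.floordiv c ((1:Int) <<< i)) 2 = 1)) xs =
        List.countP (pvBit i) xs := fun xs =>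
    List.countP_congr (fun c _ => by
      simp only [pvBit, decide_eq_true_eq]
      exact (pv_bit_mod c i).symm)
  have h2 : a.foldl (fun s c =>
      if PySem.Int.mod (PySem.Int.floordiv c ((1:Int) <<< i)) 2 = 1 then s + 1 else s) (0:Int) =
      (a.countP (pvBit i) : Int) := by
    rw [pv_foldl_count, hcnt a]
    ring
  have h3 : PySem.List.pyGetD
      ((pvSetOfList (PySem.List.pyRange l (r+1) 1)).foldl (fun bits c => pvBitsStep c bits)
        (List.replicate 18 (0:Int))) (i : Int) 0 =
      pvF ((1:Int) <<< i) (max l (r+1)) - pvF ((1:Int) <<< i) l := by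
    rw [pvSetOfList_eq_ofList, pv_ofList_nodup (PySem.List.nodup_pyRange_one l (r+1))]
    rw [pv_bits_fold_get (PySem.List.pyRange l (r+1) 1) i hi18]
    by_cases hlr : l ≤ r + 1
    · rw [max_eq_right hlr]
      rw [← pv_range_count ((1:Int) <<< i) hm l (r+1) hlr, hcnt]
    · rw [max_eq_left (by omega)]
      rw [PySem.List.pyRange_one_eq_nil (by omega)]
      simp
  rw [h1, h2, h3]
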